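-- pv_equiv track=rewrite | github.com/JunseoChoJJ/codeSignalSolutions | Arcade/Core/Lineup.py | solution
-- ===== SOURCE A (Python) =====
-- def solution(commands):
--
--     count = 0
--
--     temp = []
--
--     for i in range(len(commands)):
--
--         if len(temp) == 0:
--             if commands[i] == "A":
--                 count += 1
--             else:
--                 temp.append(commands[i])
--         else:
--             if commands[i] == "A":
--                 continue
--             else:
--                 count += 1
--                 temp.remove(temp[0])
--
--     return count
--
--
--     '''
--     best voted solution
--     weird = False
--     total = 0
--     for command in commands:
--         if command == 'L' or command == 'R':
--             weird = not weird
--         if not weird: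
--             total += 1
--     return total
--     '''
-- ===== SOURCE B (Python) =====
-- def solution(commands):
--     # Segment-skipping scan: no toggle state. A soldier facing the marker "A"
--     # while the line is straight counts; a turn command opens a "turned" stretch
--     # that is skipped wholesale up to (and counting) the turn that closes it.
--     total = 0
--     i = 0
--     n = len(commands)
--     while i < n:
--         if commands[i] == "A":
--             total += 1
--             i += 1
--         else:
--             j = i + 1
--             while j < n and commands[j] == "A":
--                 j += 1
--             if j < n:
--                 total += 1
--             i = j + 1
--     return total
-- ===== Notes on version B (the rewrite author's own statement) =====
-- stated objective: simpler
-- what changed: Replaces A's stateful one-pass scan (a length-checked temp-list holder toggled per command) by a stateless segment-skipping scan: a soldier counts directly while the line is straight, and each turn command is paired with the next turn command by an inner scan that skips the turned stretch wholesale.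
import Mathlib
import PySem

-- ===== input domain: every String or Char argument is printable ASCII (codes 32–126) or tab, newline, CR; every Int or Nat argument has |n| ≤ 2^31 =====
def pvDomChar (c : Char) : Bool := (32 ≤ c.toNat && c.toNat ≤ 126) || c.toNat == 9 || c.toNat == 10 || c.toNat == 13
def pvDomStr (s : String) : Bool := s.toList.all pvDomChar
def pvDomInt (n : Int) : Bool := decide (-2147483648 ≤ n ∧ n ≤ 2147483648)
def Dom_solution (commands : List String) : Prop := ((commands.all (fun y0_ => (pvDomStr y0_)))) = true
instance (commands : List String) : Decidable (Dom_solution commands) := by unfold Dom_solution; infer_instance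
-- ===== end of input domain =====

-- B replaces A's stateful one-pass scan by a stateless segment-skipping scan
-- (each turn command closes against the next turn command; the stretch between
-- them is skipped wholesale). Objective: simpler.

-- ===== PORT A =====
-- A's loop state: (count, temp); iterates i over range(len(commands)), reading commands[i].
def solutionStepA (s : Int × List String) (c : String) : Int × List String :=
  if s.2.length == 0 then
    if c == "A" then (s.1 + 1, s.2) else (s.1, s.2 ++ [c])
  else
    if c == "A" then s
    else (s.1 + 1, ((PySem.List.remove? s.2 ((PySem.List.pyGet? s.2 0).getD "")).getD s.2))

def solution (commands : List String) : Int :=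
  ((PySem.List.pyRange 0 (PySem.List.len commands) 1).foldl
    (fun s i => solutionStepA s (PySem.List.pyGetD commands i "")) ((0 : Int), ([] : List String))).1

-- ===== PORT B =====
-- inner while loop of Source B: advance past "A"s to the command after the closing
-- turn; none when the line ends first (j reached n).
def solutionSkip : List String → Option (List String)
  | [] => none
  | c :: cs => if c == "A" then solutionSkip cs else some cs

theorem solutionSkip_length {cs rest : List String} (h : solutionSkip cs = some rest) :
    rest.length < cs.length := by
  induction cs with
  | nil => simp [solutionSkip] at h
  | cons c cs ih =>
      by_cases hc : c = "A"
      · simp [solutionSkip, hc] at h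
        exact Nat.lt_succ_of_lt (ih h)
      · simp [solutionSkip, hc] at h
        subst h; simp

-- outer while loop of Source B, as recursion on the remaining commands.
def solutionGo (l : List String) : Int :=
  match l with
  | [] => 0
  | c :: cs =>
      if c == "A" then 1 + solutionGo cs
      else
        match h : solutionSkip cs with
        | none => 0
        | some rest => 1 + solutionGo rest
termination_by l.length
decreasing_by
  · simp
  · exact Nat.lt_succ_of_lt (solutionSkip_length h)

def solution_alt (commands : List String) : Int := solutionGo commands

-- ===== PRECONDITION & SPEC =====
def Spec_solution (commands : List String) (out : Int) : Prop := out = solution_alt commands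
instance (commands : List String) (out : Int) : Decidable (Spec_solution commands out) := by unfold Spec_solution; infer_instance

-- ===== CLAIM (what is proved, stated in full; the proofs are below) =====
def Claim_equal_solution : Prop := ∀ (commands : List String), Dom_solution commands → Spec_solution commands (solution commands)

-- ===== LEMMAS AND PROOFS =====

-- A's index loop over range(len) with commands[i] is the fold over the list itself.
theorem solution_foldl (commands : List String) :
    solution commands = (commands.foldl solutionStepA ((0 : Int), ([] : List String))).1 := by
  unfold solution
  rw [PySem.List.foldl_pyRange_zero_pyGetD commands "" solutionStepA ((0 : Int), ([] : List String))]

-- Main invariant: A's fold from an empty holder computes k + solutionGo l, and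
-- from a one-element holder computes k + (0 or 1 + solutionGo rest) per solutionSkip.
theorem foldl_stepA_go (l : List String) :
    (∀ k : Int, (l.foldl solutionStepA (k, ([] : List String))).1 = k + solutionGo l) ∧
    (∀ (k : Int) (x : String),
      (l.foldl solutionStepA (k, [x])).1 =
        k + (match solutionSkip l with | none => 0 | some rest => 1 + solutionGo rest)) := by
  induction l with
  | nil => simp [solutionGo, solutionSkip]
  | cons c cs ih =>
      refine ⟨fun k => ?_, fun k x => ?_⟩
      · by_cases hc : c = "A"
        · simp [solutionStepA, hc, solutionGo, ih.1]
          ring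
        · simp only [List.foldl_cons, solutionStepA]
          rw [if_pos (by simp)]
          rw [if_neg (by simp [hc])]
          simp only [List.nil_append]
          rw [ih.2 k c]
          unfold solutionGo
          rw [if_neg (by simp [hc])]
          cases hs : solutionSkip cs with
          | none => simp [hs]
          | some rest =>
              simp only [hs]
              conv_rhs => rw [solutionGo.eq_def]
      · by_cases hc : c = "A"
        · simp only [List.foldl_cons, solutionStepA]
          rw [if_neg (by simp)]
          rw [if_pos (by simp [hc])]
          rw [ih.2 k x]
          simp [solutionSkip, hc]
        · simp only [List.foldl_cons, solutionStepA]
          rw [if_neg (by simp)]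
          rw [if_neg (by simp [hc])]
          simp only [PySem.List.pyGet?, PySem.List.pyIdx?]
          norm_num [PySem.List.remove?]
          rw [ih.1 (k + 1)]
          simp [solutionSkip, hc]
          ring

-- ===== VERDICT (by name: the statement is the Claim_ definition above) =====
theorem solution_spec : Claim_equal_solution := by
  intro commands _
  unfold Spec_solution solution_alt
  rw [solution_foldl, (foldl_stepA_go commands).1 0]
  simp
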